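-- pv_equiv track=rewrite | github.com/deathboyknn/ghtp | SP.py | inc_ter
-- ===== SOURCE A (Python) =====
-- def inc_ter(x):
--     arr = list(x)
--     i = len(x) - 1
--     while i >= 0 and arr[i] == '1':
--         arr[i] = '$'
--         i -= 1
--     if i == -1:
--         return('1' + ''.join(arr))
--     else:
--         if arr[i] == '$':
--             arr[i] = "0"
--         else:
--             arr[i] = "1"
--         if not i and arr[0] == '0' and len(arr) > 1:
--             return(''.join(arr[1:]))
--         else:
--             return(''.join(arr))
-- ===== SOURCE B (Python) =====
-- def inc_ter(x):
--     def f(s):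
--         # structural recursion on the last character, propagating the carry
--         if not s:
--             return '1'
--         head, last = s[:-1], s[-1]
--         if last == '1':
--             return f(head) + '$'
--         if last == '$':
--             return head + '0'
--         return head + '1'
--
--     r = f(x)
--     # drop the leading digit when the carry reached position 0 and turned '$' into '0'
--     if len(x) > 1 and x[0] == '$' and all(c == '1' for c in x[1:]):
--         return r[1:]
--     return r
-- ===== Notes on version B (the rewrite author's own statement) =====
-- stated objective: alternative
-- what changed: Replaces A's in-place array mutation driven by a backward index loop with a structural recursion on the last character that propagates the carry, plus a separate top-level leading-digit-drop test stated directly on the input (x[0]=='$' and all of x[1:] are '1') instead of on leftover loop state.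
import Mathlib
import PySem

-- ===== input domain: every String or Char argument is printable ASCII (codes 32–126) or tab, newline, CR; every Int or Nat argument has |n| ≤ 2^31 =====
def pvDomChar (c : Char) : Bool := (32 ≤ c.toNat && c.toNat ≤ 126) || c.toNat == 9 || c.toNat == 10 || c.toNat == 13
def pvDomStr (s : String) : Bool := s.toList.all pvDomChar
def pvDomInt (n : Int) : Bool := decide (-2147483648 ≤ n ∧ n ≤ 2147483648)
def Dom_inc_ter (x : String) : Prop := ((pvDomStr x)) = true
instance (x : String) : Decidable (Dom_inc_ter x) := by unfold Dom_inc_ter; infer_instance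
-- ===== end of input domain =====

-- B replaces A's in-place backward index loop by a structural recursion on the last
-- character plus a top-level leading-digit-drop test on the input (alternative); return values proved equal on all strings.

-- ===== PORT A =====
-- A walks i from the end while arr[i]=='1', writing '$'; we transliterate that
-- backward walk as a recursion over the reversed character list carrying the
-- same state: the '$'s written so far and the untouched remainder.
def incTerLoop : List Char → List Char × List Char
  | [] => ([], [])
  | c :: rest =>
    if c == '1' then
      let p := incTerLoop rest
      ('$' :: p.1, p.2)
    else ([], c :: rest)

def inc_ter (x : String) : String :=
  match incTerLoop x.toList.reverse with
  | (ds, []) => String.ofList ('1' :: ds.reverse)          -- i == -1 branch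
  | (ds, c :: pre) =>
      let c' := if c == '$' then '0' else '1'
      if pre = [] ∧ c' = '0' ∧ x.toList.length > 1 then
        String.ofList ds.reverse                            -- arr[1:]
      else
        String.ofList (pre.reverse ++ c' :: ds.reverse)

-- ===== PORT B =====
-- Source B's f: structural recursion on the LAST character; encoded as the standard
-- recursion over the reversed character list (result also reversed).
def incTerRec : List Char → List Char
  | [] => ['1']
  | c :: rest =>
    if c == '1' then '$' :: incTerRec rest
    else if c == '$' then '0' :: rest
    else '1' :: rest

def inc_ter_alt (x : String) : String :=
  let r := (incTerRec x.toList.reverse).reverse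
  if x.toList.length > 1 ∧ x.toList.head? = some '$'
      ∧ (x.toList.drop 1).all (fun c => c == '1') then
    String.ofList (r.drop 1)
  else
    String.ofList r

-- ===== PRECONDITION & SPEC =====
def Spec_inc_ter (x : String) (out : String) : Prop := out = inc_ter_alt x
instance (x : String) (out : String) : Decidable (Spec_inc_ter x out) := by unfold Spec_inc_ter; infer_instance

-- ===== CLAIM (what is proved, stated in full; the proofs are below) =====
def Claim_equal_inc_ter : Prop := ∀ (x : String), Dom_inc_ter x → Spec_inc_ter x (inc_ter x)

-- ===== LEMMAS AND PROOFS =====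
theorem incTerLoop_eq (l : List Char) :
    incTerLoop l = (List.replicate (l.takeWhile (fun c => c == '1')).length '$',
                    l.dropWhile (fun c => c == '1')) := by
  induction l with
  | nil => rfl
  | cons c rest ih =>
    by_cases hc : c = '1'
    · simp [incTerLoop, hc, ih, List.replicate_succ]
    · simp [incTerLoop, hc]

theorem incTerRec_eq (l : List Char) :
    incTerRec l = List.replicate (l.takeWhile (fun c => c == '1')).length '$' ++
      (match l.dropWhile (fun c => c == '1') with
       | [] => ['1']
       | c :: rest => (if c == '$' then '0' else '1') :: rest) := by
  induction l with
  | nil => rfl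
  | cons c rest ih =>
    by_cases hc : c = '1'
    · simp [incTerRec, hc, ih, List.replicate_succ]
    · by_cases hd : c = '$' <;> simp [incTerRec, hc, hd]

-- head of a dropWhile never satisfies the predicate
theorem dropWhile_head_false {p : Char → Bool} :
    ∀ (l : List Char) (c : Char) (pre : List Char),
      l.dropWhile p = c :: pre → p c = false := by
  intro l
  induction l with
  | nil => intro c pre h; simp [List.dropWhile] at h
  | cons a rest ih =>
    intro c pre h
    by_cases hpa : p a
    · rw [List.dropWhile_cons_of_pos hpa] at h; exact ih _ _ h
    · rw [List.dropWhile_cons_of_neg hpa] at h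
      cases h; simpa using hpa

-- the input decomposes as (dropWhile of the reverse).reverse ++ trailing ones
theorem toList_decomp (x : String) :
    x.toList = (x.toList.reverse.dropWhile (fun c => c == '1')).reverse ++
      List.replicate (x.toList.reverse.takeWhile (fun c => c == '1')).length '1' := by
  have h := List.takeWhile_append_dropWhile (p := fun c => c == '1') (l := x.toList.reverse)
  have ht : x.toList.reverse.takeWhile (fun c => c == '1') =
      List.replicate (x.toList.reverse.takeWhile (fun c => c == '1')).length '1' := by
    rw [List.eq_replicate_iff]
    refine ⟨rfl, fun b hb => ?_⟩
    have := List.mem_takeWhile_imp hb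
    simpa using this
  calc x.toList = x.toList.reverse.reverse := by simp
    _ = _ := by
        conv_lhs => rw [← h]
        rw [List.reverse_append]
        congr 1
        conv_lhs => rw [ht]
        rw [List.reverse_replicate]

-- ===== VERDICT (by name: the statement is the Claim_ definition above) =====
theorem inc_ter_spec : Claim_equal_inc_ter := by
  intro x _
  unfold Spec_inc_ter inc_ter inc_ter_alt
  rw [incTerLoop_eq, incTerRec_eq]
  have hdec := toList_decomp x
  set k := (x.toList.reverse.takeWhile (fun c => c == '1')).length with hk
  clear_value k
  cases hd : x.toList.reverse.dropWhile (fun c => c == '1') with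
  | nil =>
    rw [hd] at hdec
    simp only [List.reverse_nil, List.nil_append] at hdec
    -- x is all '1's: B's drop condition is false
    have hcond : ¬ (x.toList.length > 1 ∧ x.toList.head? = some '$'
        ∧ ((x.toList.drop 1).all (fun c => c == '1')) = true) := by
      rintro ⟨hlen, hhead, -⟩
      rw [hdec] at hhead hlen
      cases k with
      | zero => simp at hlen
      | succ n => simp [List.replicate_succ] at hhead
    dsimp only
    rw [if_neg hcond]
    simp
  | cons c pre =>
    rw [hd] at hdec
    have hc1 : c ≠ '1' := by
      have := dropWhile_head_false _ _ _ hd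
      simpa using this
    dsimp only
    cases hp : pre with
    | nil =>
      subst hp
      simp only [List.reverse_cons, List.reverse_nil, List.nil_append] at hdec
      have hhead : x.toList.head? = some c := by rw [hdec]; rfl
      have hdrop : ((x.toList.drop 1).all (fun c => c == '1')) = true := by
        rw [hdec]; simp
      by_cases hcS : c = '$'
      · by_cases hl : x.toList.length > 1
        · rw [if_pos ⟨rfl, by simp [hcS], hl⟩,
              if_pos ⟨hl, by rw [hhead, hcS], hdrop⟩]
          simp
        · rw [if_neg (c := ([] : List Char) = [] ∧ (if c == '$' then '0' else '1') = '0' ∧ x.toList.length > 1) (fun h => hl h.2.2),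
              if_neg (c := x.toList.length > 1 ∧ x.toList.head? = some '$' ∧ ((x.toList.drop 1).all (fun c => c == '1')) = true) (fun h => hl h.1)]
          simp
      · rw [if_neg (c := ([] : List Char) = [] ∧ (if c == '$' then '0' else '1') = '0' ∧ x.toList.length > 1)
              (fun h => (by simp [hcS] : ¬(if c == '$' then '0' else '1') = '0') h.2.1),
            if_neg (c := x.toList.length > 1 ∧ x.toList.head? = some '$' ∧ ((x.toList.drop 1).all (fun c => c == '1')) = true)
              (fun h => hcS (Option.some.inj (hhead.symm.trans h.2.1)))]
        simp
    | cons p ps =>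
      subst hp
      -- pre nonempty: c occurs in x.toList.drop 1, so B's all-'1' test fails
      have hcond : ¬ (x.toList.length > 1 ∧ x.toList.head? = some '$'
          ∧ ((x.toList.drop 1).all (fun c => c == '1')) = true) := by
        rintro ⟨-, -, hall⟩
        have hdec' : x.toList = (p :: ps).reverse ++ (c :: List.replicate k '1') := by
          rw [hdec]; simp
        have hmem : c ∈ x.toList.drop 1 := by
          rw [hdec', List.drop_append_of_le_length (by simp)]
          exact List.mem_append_right _ (List.mem_cons_self ..)
        have := List.all_eq_true.mp hall c hmem
        exact hc1 (by simpa using this)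
      have hpre : ¬ ((p :: ps) = [] ∧ (if c == '$' then '0' else '1') = '0'
          ∧ x.toList.length > 1) := by rintro ⟨h, -, -⟩; exact absurd h (by simp)
      rw [if_neg hpre, if_neg hcond]
      simp
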